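-- pv_equiv track=rewrite | github.com/tal69/EscortFlow | PBSCom.py | listTuple2Int
-- ===== SOURCE A (Python) =====
-- def listTuple2Int(L, Lx, Ly):
--     NumOfCells = Lx * Ly;
--     b = NumOfCells
--     n = len(L) - 1
--
--     for i in L:
--         n += (i[0] * Ly + i[1]) * b
--         b *= NumOfCells
--
--     return n
-- ===== SOURCE B (Python) =====
-- def listTuple2Int(L, Lx, Ly):
--     N = Lx * Ly
--
--     def val(xs):
--         # returns (Horner value of xs in base N, N ** len(xs))
--         if not xs:
--             return (0, 1)
--         if len(xs) == 1:
--             x, y = xs[0]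
--             return (x * Ly + y, N)
--         m = len(xs) // 2
--         v1, p1 = val(xs[:m])
--         v2, p2 = val(xs[m:])
--         return (v1 + p1 * v2, p1 * p2)
--
--     v, _ = val(L)
--     return len(L) - 1 + N * v
-- ===== Notes on version B (the rewrite author's own statement) =====
-- stated objective: alternative
-- what changed: Replaces A's forward loop with its separate running power b by a divide-and-conquer recursion that splits the list in halves, combining (value, power) pairs, followed by one final multiply-add of the length offset.
import Mathlib
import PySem

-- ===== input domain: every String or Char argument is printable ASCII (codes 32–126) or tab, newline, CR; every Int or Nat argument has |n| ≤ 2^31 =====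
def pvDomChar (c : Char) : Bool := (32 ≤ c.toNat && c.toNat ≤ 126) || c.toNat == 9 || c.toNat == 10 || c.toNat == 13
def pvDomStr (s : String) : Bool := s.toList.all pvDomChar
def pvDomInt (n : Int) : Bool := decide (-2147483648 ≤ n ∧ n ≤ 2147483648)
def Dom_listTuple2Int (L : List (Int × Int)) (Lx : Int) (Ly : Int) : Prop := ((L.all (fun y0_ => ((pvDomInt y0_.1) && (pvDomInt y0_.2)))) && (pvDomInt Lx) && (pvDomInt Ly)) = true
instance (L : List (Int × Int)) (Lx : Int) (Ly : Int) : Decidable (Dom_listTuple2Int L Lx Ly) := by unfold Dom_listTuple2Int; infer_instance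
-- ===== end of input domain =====

-- B replaces A's forward loop with a running power by a divide-and-conquer recursion on halves (alternative decomposition, same cost).

-- ===== PORT A =====
-- forward loop maintaining (n, b); n starts at len(L)-1, b at NumOfCells
def listTuple2Int (L : List (Int × Int)) (Lx : Int) (Ly : Int) : Int :=
  let NumOfCells := Lx * Ly
  let s := L.foldl (fun (s : Int × Int) i => (s.1 + (i.1 * Ly + i.2) * s.2, s.2 * NumOfCells))
            (((L.length : Int) - 1), NumOfCells)
  s.1

-- ===== PORT B =====
-- val xs = (Horner value of xs in base N, N ^ len xs), computed by splitting xs in halves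
def lt2iVal (Ly N : Int) : List (Int × Int) → Int × Int
  | [] => (0, 1)
  | [i] => (i.1 * Ly + i.2, N)
  | x :: y :: t =>
      let xs := x :: y :: t
      let m := xs.length / 2
      let v1 := lt2iVal Ly N (xs.take m)
      let v2 := lt2iVal Ly N (xs.drop m)
      (v1.1 + v1.2 * v2.1, v1.2 * v2.2)
termination_by xs => xs.length
decreasing_by
  · simp [List.length_take]; omega
  · simp [List.length_drop]; omega

def listTuple2Int_alt (L : List (Int × Int)) (Lx : Int) (Ly : Int) : Int :=
  let N := Lx * Ly
  let v := lt2iVal Ly N L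
  (L.length : Int) - 1 + N * v.1

-- ===== PRECONDITION & SPEC =====
def Spec_listTuple2Int (L : List (Int × Int)) (Lx : Int) (Ly : Int) (out : Int) : Prop := out = listTuple2Int_alt L Lx Ly
instance (L : List (Int × Int)) (Lx : Int) (Ly : Int) (out : Int) : Decidable (Spec_listTuple2Int L Lx Ly out) := by unfold Spec_listTuple2Int; infer_instance

-- ===== CLAIM =====
def Claim_equal_listTuple2Int : Prop := ∀ (L : List (Int × Int)) (Lx : Int) (Ly : Int), Dom_listTuple2Int L Lx Ly → Spec_listTuple2Int L Lx Ly (listTuple2Int L Lx Ly)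

-- ===== LEMMAS AND PROOFS =====

-- the Horner polynomial both sides compute
def lt2iHorner (Ly N : Int) (L : List (Int × Int)) : Int :=
  L.foldr (fun i acc => (i.1 * Ly + i.2) + N * acc) 0

-- A's loop, started at (n, b), returns n + b * horner L
theorem lt2i_foldl_eq (Ly N : Int) (L : List (Int × Int)) :
    ∀ (n b : Int),
      (L.foldl (fun (s : Int × Int) i => (s.1 + (i.1 * Ly + i.2) * s.2, s.2 * N)) (n, b)).1
        = n + b * lt2iHorner Ly N L := by
  induction L with
  | nil => intro n b; simp [lt2iHorner]
  | cons h t ih =>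
      intro n b
      simp only [List.foldl_cons, lt2iHorner, List.foldr_cons, ih]
      simp only [lt2iHorner] at ih ⊢
      ring

-- horner splits over append with the power of the left length
theorem lt2i_horner_append (Ly N : Int) (a b : List (Int × Int)) :
    lt2iHorner Ly N (a ++ b) = lt2iHorner Ly N a + N ^ a.length * lt2iHorner Ly N b := by
  induction a with
  | nil => simp [lt2iHorner]
  | cons h t ih =>
      simp only [lt2iHorner, List.cons_append, List.foldr_cons, List.length_cons] at ih ⊢
      rw [ih]
      ring

-- the divide-and-conquer helper computes (horner, N^len)
theorem lt2iVal_eq (Ly N : Int) : ∀ (xs : List (Int × Int)),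
    lt2iVal Ly N xs = (lt2iHorner Ly N xs, N ^ xs.length) := by
  intro xs
  induction hn : xs.length using Nat.strong_induction_on generalizing xs with
  | _ n ih =>
    subst hn
    match xs with
    | [] => simp [lt2iVal, lt2iHorner]
    | [i] => simp [lt2iVal, lt2iHorner]
    | x :: y :: t =>
      rw [lt2iVal]
      have hm2 : (x :: y :: t).length / 2 < (x :: y :: t).length := by simp; omega
      have h1 : ((x :: y :: t).take ((x :: y :: t).length / 2)).length < (x :: y :: t).length := by
        simp [List.length_take]; omega
      have h2 : ((x :: y :: t).drop ((x :: y :: t).length / 2)).length < (x :: y :: t).length := by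
        simp [List.length_drop]; omega
      rw [ih _ h1 _ rfl, ih _ h2 _ rfl]
      have hsplit := List.take_append_drop ((x :: y :: t).length / 2) (x :: y :: t)
      have hh := lt2i_horner_append Ly N ((x :: y :: t).take ((x :: y :: t).length / 2)) ((x :: y :: t).drop ((x :: y :: t).length / 2))
      rw [hsplit] at hh
      simp only [Prod.mk.injEq]
      refine ⟨by rw [hh], ?_⟩
      rw [← pow_add, List.length_take, List.length_drop]
      congr 1
      omega

-- ===== VERDICT =====
theorem listTuple2Int_spec : Claim_equal_listTuple2Int := by
  intro L Lx Ly _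
  unfold Spec_listTuple2Int listTuple2Int listTuple2Int_alt
  simp only [lt2i_foldl_eq, lt2iVal_eq]
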